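-- pv_equiv track=rewrite | github.com/yaunzhiguo/AI-Engineer-Training | day01/generate_scores.py | level_count
-- ===== SOURCE A (Python) =====
-- def level_count(data: dict):
--     res = {"excellent": 0, "good": 0, "pass": 0, "fail": 0}
--     for score in data.values():
--         if score >= 90:
--             res["excellent"] += 1
--         elif score >= 80:
--             res["good"] += 1
--         elif score >= 60:
--             res["pass"] += 1
--         else:
--             res["fail"] += 1
--     return res
-- ===== SOURCE B (Python) =====
-- def level_count(data: dict):
--     scores = list(data.values())
--     ge90 = sum(1 for s in scores if s >= 90)
--     ge80 = sum(1 for s in scores if s >= 80)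
--     ge60 = sum(1 for s in scores if s >= 60)
--     return {
--         "excellent": ge90,
--         "good": ge80 - ge90,
--         "pass": ge60 - ge80,
--         "fail": len(scores) - ge60,
--     }
-- ===== Notes on version B (the rewrite author's own statement) =====
-- stated objective: alternative
-- what changed: Instead of bucketing each score through a per-element branch chain into a counter dict, B makes staged counting passes (how many scores are >= 90, >= 80, >= 60) and derives the four category counts by subtracting adjacent cumulative counts, building the result dict directly from those differences.
import Mathlib
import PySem

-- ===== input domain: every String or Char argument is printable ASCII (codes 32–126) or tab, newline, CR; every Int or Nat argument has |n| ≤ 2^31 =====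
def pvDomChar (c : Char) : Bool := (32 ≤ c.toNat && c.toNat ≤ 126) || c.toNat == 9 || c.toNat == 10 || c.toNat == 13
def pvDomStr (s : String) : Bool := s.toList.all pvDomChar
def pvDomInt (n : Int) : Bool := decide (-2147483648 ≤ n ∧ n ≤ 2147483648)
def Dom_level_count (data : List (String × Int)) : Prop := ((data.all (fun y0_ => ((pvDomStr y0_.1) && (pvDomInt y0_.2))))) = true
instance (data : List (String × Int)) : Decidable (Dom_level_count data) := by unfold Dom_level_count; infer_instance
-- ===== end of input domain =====

-- B replaces A's per-element branch-chain bucketing by three staged cumulative counting passes (>=90, >=80, >=60) whose adjacent differences give the four category counts (alternative structure, same cost).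


-- ===== PORT A =====
def level_count (data : List (String × Int)) : List (String × Int) :=
  let res : PySem.Dict String Int :=
    PySem.Dict.ofList [("excellent", 0), ("good", 0), ("pass", 0), ("fail", 0)]
  let res := ((PySem.Dict.ofList data).values).foldl
    (fun r score =>
      if score ≥ 90 then r.modify "excellent" 0 (· + 1)
      else if score ≥ 80 then r.modify "good" 0 (· + 1)
      else if score ≥ 60 then r.modify "pass" 0 (· + 1)
      else r.modify "fail" 0 (· + 1)) res
  res.items

-- ===== PORT B =====
-- sum(1 for s in scores if s >= k) is ported as the corresponding count, List.countP
def level_count_alt (data : List (String × Int)) : List (String × Int) :=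
  let scores := (PySem.Dict.ofList data).values
  let ge90 : Int := scores.countP (fun s => 90 ≤ s)
  let ge80 : Int := scores.countP (fun s => 80 ≤ s)
  let ge60 : Int := scores.countP (fun s => 60 ≤ s)
  [("excellent", ge90), ("good", ge80 - ge90), ("pass", ge60 - ge80),
   ("fail", (scores.length : Int) - ge60)]

-- ===== PRECONDITION & SPEC =====
def Spec_level_count (data : List (String × Int)) (out : List (String × Int)) : Prop := out = level_count_alt data
instance (data : List (String × Int)) (out : List (String × Int)) : Decidable (Spec_level_count data out) := by unfold Spec_level_count; infer_instance

-- ===== CLAIM =====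
def Claim_equal_level_count : Prop := ∀ (data : List (String × Int)), Dom_level_count data → Spec_level_count data (level_count data)

-- ===== LEMMAS AND PROOFS =====

-- A's counting loop, run from any 4-value literal dict, lands on B's cumulative-difference formulas
theorem fold_items (l : List Int) (a b c f : Int) :
    (l.foldl
      (fun r score =>
        if score ≥ 90 then r.modify "excellent" 0 (· + 1)
        else if score ≥ 80 then r.modify "good" 0 (· + 1)
        else if score ≥ 60 then r.modify "pass" 0 (· + 1)
        else r.modify "fail" 0 (· + 1))
      (PySem.Dict.mk [("excellent", a), ("good", b), ("pass", c), ("fail", f)])).items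
    = [("excellent", a + (l.countP (fun s => 90 ≤ s) : Int)),
       ("good", b + ((l.countP (fun s => 80 ≤ s) : Int) - (l.countP (fun s => 90 ≤ s) : Int))),
       ("pass", c + ((l.countP (fun s => 60 ≤ s) : Int) - (l.countP (fun s => 80 ≤ s) : Int))),
       ("fail", f + ((l.length : Int) - (l.countP (fun s => 60 ≤ s) : Int)))] := by
  induction l generalizing a b c f with
  | nil => simp
  | cons s t ih =>
    simp only [List.foldl_cons, List.length_cons]
    split_ifs with h1 h2 h3
    · have h2 : (80:Int) ≤ s := by omega
      have h3 : (60:Int) ≤ s := by omega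
      rw [show (PySem.Dict.mk [("excellent", a), ("good", b), ("pass", c), ("fail", f)]).modify
          "excellent" 0 (· + 1)
          = PySem.Dict.mk [("excellent", a + 1), ("good", b), ("pass", c), ("fail", f)] from rfl, ih]
      simp only [List.countP_cons, h1, h2, h3, decide_true, if_true, List.cons.injEq,
        Prod.mk.injEq, true_and, and_true]
      refine ⟨?_, ?_, ?_, ?_⟩ <;> push_cast <;> ring
    · have h3 : (60:Int) ≤ s := by omega
      have h1' : ¬ decide ((90:Int) ≤ s) = true := by simpa using h1
      rw [show (PySem.Dict.mk [("excellent", a), ("good", b), ("pass", c), ("fail", f)]).modify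
          "good" 0 (· + 1)
          = PySem.Dict.mk [("excellent", a), ("good", b + 1), ("pass", c), ("fail", f)] from rfl, ih]
      simp only [List.countP_cons, h1', h2, h3, decide_true, if_true,
        List.cons.injEq, Prod.mk.injEq, true_and, and_true]
      refine ⟨?_, ?_, ?_, ?_⟩ <;> push_cast <;> ring
    · have h1' : ¬ decide ((90:Int) ≤ s) = true := by simpa using h1
      have h2' : ¬ decide ((80:Int) ≤ s) = true := by simpa using h2
      rw [show (PySem.Dict.mk [("excellent", a), ("good", b), ("pass", c), ("fail", f)]).modify
          "pass" 0 (· + 1)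
          = PySem.Dict.mk [("excellent", a), ("good", b), ("pass", c + 1), ("fail", f)] from rfl, ih]
      simp only [List.countP_cons, h1', h2', h3, decide_true, if_true,
        List.cons.injEq, Prod.mk.injEq, true_and, and_true]
      refine ⟨?_, ?_, ?_, ?_⟩ <;> push_cast <;> ring
    · have h1' : ¬ decide ((90:Int) ≤ s) = true := by simpa using h1
      have h2' : ¬ decide ((80:Int) ≤ s) = true := by simpa using h2
      have h3' : ¬ decide ((60:Int) ≤ s) = true := by simpa using h3
      rw [show (PySem.Dict.mk [("excellent", a), ("good", b), ("pass", c), ("fail", f)]).modify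
          "fail" 0 (· + 1)
          = PySem.Dict.mk [("excellent", a), ("good", b), ("pass", c), ("fail", f + 1)] from rfl, ih]
      simp only [List.countP_cons, h1', h2', h3', List.cons.injEq,
        Prod.mk.injEq, true_and, and_true]
      refine ⟨?_, ?_, ?_, ?_⟩ <;> push_cast <;> ring

-- ===== VERDICT =====
theorem level_count_spec : Claim_equal_level_count := by
  intro data _
  unfold Spec_level_count level_count level_count_alt
  have h0 : (PySem.Dict.ofList [("excellent", (0:Int)), ("good", 0), ("pass", 0), ("fail", 0)])
      = PySem.Dict.mk [("excellent", 0), ("good", 0), ("pass", 0), ("fail", 0)] := by decide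
  rw [h0, fold_items]
  simp
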